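-- pv_equiv track=rewrite | github.com/Mastercard/p11perftest | scripts/gengraphs.py | splithalf
-- ===== SOURCE A (Python) =====
-- def splithalf(string):
--     """split a sentence in two halves"""
--     midpos = len(string) // 2
--     curpos = 0
--
--     for wordlen in map(len, string.split(' ')):
--         curpos += wordlen + 1
--         if curpos > midpos:
--             break
--     return string[:curpos - 1], string[curpos:]
-- ===== SOURCE B (Python) =====
-- def splithalf(string):
--     """split a sentence in two halves"""
--     midpos = len(string) // 2
--     idx = string.find(' ', midpos)
--     if idx == -1:
--         return string, ''
--     return string[:idx], string[idx + 1:]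
-- ===== Notes on version B (the rewrite author's own statement) =====
-- stated objective: simpler
-- what changed: Replaces the word-splitting and length-accumulation loop by a single bounded search: the cut point is exactly the first space character at index >= len(string)//2 (falling back to the whole string when there is none), found with str.find starting at midpos.
import Mathlib
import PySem

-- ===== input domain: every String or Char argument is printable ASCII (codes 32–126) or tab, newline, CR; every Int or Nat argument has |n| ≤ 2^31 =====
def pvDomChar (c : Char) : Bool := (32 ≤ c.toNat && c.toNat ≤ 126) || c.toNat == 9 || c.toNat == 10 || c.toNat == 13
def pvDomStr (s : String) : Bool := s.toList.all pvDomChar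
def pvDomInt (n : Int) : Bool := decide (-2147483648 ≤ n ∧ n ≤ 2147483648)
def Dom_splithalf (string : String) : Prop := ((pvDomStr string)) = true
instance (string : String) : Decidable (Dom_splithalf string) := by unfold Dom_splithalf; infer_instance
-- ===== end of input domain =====

-- B replaces A's word-splitting and length-accumulation loop by a single search for the
-- first space at index ≥ len(string)//2 (objective: simpler); return values proved equal.


-- ===== PORT A =====
-- the 'for wordlen in map(len, string.split(' ')): curpos += wordlen + 1; if curpos > midpos: break' loop
def splithalfLoop (lens : List Int) (midpos : Int) (curpos : Int) : Int :=
  match lens with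
  | [] => curpos
  | l :: ls =>
    let curpos' := curpos + l + 1
    if curpos' > midpos then curpos' else splithalfLoop ls midpos curpos'

def splithalf (string : String) : String × String :=
  let midpos := PySem.Int.floordiv (PySem.Str.len string) 2
  -- the separator is the nonempty literal " ", so split? is always some (no ValueError): exact
  let words := (PySem.Str.split? string " ").getD []
  let curpos := splithalfLoop (words.map PySem.Str.len) midpos 0
  (PySem.Str.slice string none (some (curpos - 1)), PySem.Str.slice string (some curpos) none)

-- ===== PORT B =====
def splithalf_alt (string : String) : String × String :=
  let midpos := PySem.Int.floordiv (PySem.Str.len string) 2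
  let idx := PySem.Str.findFrom string " " midpos
  if idx = -1 then (string, "")
  else (PySem.Str.slice string none (some idx), PySem.Str.slice string (some (idx + 1)) none)

-- ===== PRECONDITION & SPEC =====
def Spec_splithalf (string : String) (out : String × String) : Prop := out = splithalf_alt string
instance (string : String) (out : String × String) : Decidable (Spec_splithalf string out) := by unfold Spec_splithalf; infer_instance

-- ===== CLAIM (what is proved, stated in full; the proofs are below) =====
def Claim_equal_splithalf : Prop := ∀ (string : String), Dom_splithalf string → Spec_splithalf string (splithalf string)

-- ===== LEMMAS AND PROOFS =====

-- split on a single space, structurally: (first word, remaining words)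
def splitCh : List Char → List Char × List (List Char)
  | [] => ([], [])
  | c :: t =>
    let p := splitCh t
    if c = ' ' then ([], p.1 :: p.2) else (c :: p.1, p.2)

-- A's loop, over Nat word lengths, with the remaining threshold
def loopN : List Nat → Nat → Nat
  | [], _ => 0
  | l :: ls, d => if d < l + 1 then l + 1 else (l + 1) + loopN ls (d - (l + 1))

-- index of the first space, structurally
def findSp : List Char → Option Nat
  | [] => none
  | c :: t => if c = ' ' then some 0 else (findSp t).map (· + 1)

theorem splitOn_go_cons (sep : List Char) (fuel : Nat) (c : Char) (rest cur : List Char)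
    (acc : List (List Char)) :
    PySem.Chars.splitOn.go sep (fuel+1) (c :: rest) cur acc =
      (if sep.isPrefixOf (c :: rest) then
        PySem.Chars.splitOn.go sep fuel (List.drop sep.length (c::rest)) [] (cur.reverse :: acc)
       else PySem.Chars.splitOn.go sep fuel rest (c :: cur) acc) := by
  rw [PySem.Chars.splitOn.go]

theorem splitOn_go_nil (sep cur : List Char) (acc : List (List Char)) (fuel : Nat) :
    PySem.Chars.splitOn.go sep (fuel+1) [] cur acc = (cur.reverse :: acc).reverse := by
  rw [PySem.Chars.splitOn.go]
  omega

theorem splitOn_go_spec (l : List Char) : ∀ (fuel : Nat), l.length < fuel → ∀ (cur : List Char) (acc : List (List Char)),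
    PySem.Chars.splitOn.go [' '] fuel l cur acc =
      acc.reverse ++ ((cur.reverse ++ (splitCh l).1) :: (splitCh l).2) := by
  induction l with
  | nil =>
    intro fuel hf cur acc
    obtain ⟨f, rfl⟩ := Nat.exists_eq_succ_of_ne_zero (by omega : fuel ≠ 0)
    simp [splitOn_go_nil, splitCh]
  | cons c t ih =>
    intro fuel hf cur acc
    obtain ⟨f, rfl⟩ := Nat.exists_eq_succ_of_ne_zero (by omega : fuel ≠ 0)
    rw [splitOn_go_cons]
    have hf' : t.length < f := by simp at hf; omega
    by_cases hc : c = ' '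
    · subst hc
      rw [if_pos (by simp [List.isPrefixOf])]
      simp only [List.length_cons, List.length_nil, Nat.zero_add, List.drop_succ_cons, List.drop_zero]
      rw [ih f hf']
      simp [splitCh]
    · rw [if_neg (by simp [List.isPrefixOf]; exact fun h => hc h.symm)]
      rw [ih f hf']
      simp [splitCh, hc]

theorem splitOn_eq_splitCh (cs : List Char) :
    PySem.Chars.splitOn cs [' '] = (splitCh cs).1 :: (splitCh cs).2 := by
  unfold PySem.Chars.splitOn
  rw [splitOn_go_spec cs (cs.length + 1) (by omega)]
  simp

theorem join_splitCh (cs : List Char) :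
    PySem.Chars.join [' '] ((splitCh cs).1 :: (splitCh cs).2) = cs := by
  induction cs with
  | nil => simp [splitCh, PySem.Chars.join_singleton]
  | cons c t ih =>
    by_cases hc : c = ' '
    · subst hc
      have hsc : splitCh (' ' :: t) = ([], (splitCh t).1 :: (splitCh t).2) := by simp [splitCh]
      rw [hsc]
      rw [PySem.Chars.join_cons_cons]
      simpa using ih
    · have hsc : splitCh (c :: t) = (c :: (splitCh t).1, (splitCh t).2) := by simp [splitCh, hc]
      rw [hsc]
      cases h2 : (splitCh t).2 with
      | nil =>
        rw [h2] at ih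
        rw [PySem.Chars.join_singleton] at ih ⊢
        simp [ih]
      | cons w ws =>
        rw [h2] at ih
        rw [PySem.Chars.join_cons_cons] at ih ⊢
        simp [ih]

theorem splitCh_space_free (cs : List Char) :
    ' ' ∉ (splitCh cs).1 ∧ ∀ w ∈ (splitCh cs).2, ' ' ∉ w := by
  induction cs with
  | nil => simp [splitCh]
  | cons c t ih =>
    by_cases hc : c = ' '
    · subst hc
      have hsc : splitCh (' ' :: t) = ([], (splitCh t).1 :: (splitCh t).2) := by simp [splitCh]
      rw [hsc]
      exact ⟨by simp, by
        intro w hw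
        simp only [List.mem_cons] at hw
        rcases hw with rfl | hw
        · exact ih.1
        · exact ih.2 w hw⟩
    · have hsc : splitCh (c :: t) = (c :: (splitCh t).1, (splitCh t).2) := by simp [splitCh, hc]
      rw [hsc]
      exact ⟨by
        intro h
        rcases List.mem_cons.mp h with h | h
        · exact hc h.symm
        · exact ih.1 h, ih.2⟩

theorem findSp_eq_none_iff (l : List Char) : findSp l = none ↔ ' ' ∉ l := by
  induction l with
  | nil => simp [findSp]
  | cons c t ih =>
    by_cases hc : c = ' '
    · subst hc; simp [findSp]
    · simp [findSp, hc, ih]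
      exact fun _ h => hc h.symm

theorem findSp_append_not_mem (p q : List Char) (h : ' ' ∉ p) :
    findSp (p ++ ' ' :: q) = some p.length := by
  induction p with
  | nil => simp [findSp]
  | cons c t ih =>
    have hc : c ≠ ' ' := fun hc => h (by simp [hc])
    simp only [List.cons_append, findSp, if_neg hc]
    rw [ih (fun ht => h (List.mem_cons_of_mem _ ht))]
    simp

theorem findSp_eq_some (l : List Char) (k : Nat) (h : findSp l = some k) :
    k < l.length ∧ l[k]? = some ' ' ∧ ∀ j < k, l[j]? ≠ some ' ' := by
  induction l generalizing k with
  | nil => simp [findSp] at h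
  | cons c t ih =>
    by_cases hc : c = ' '
    · subst hc
      simp [findSp] at h
      subst h
      simp
    · simp only [findSp, if_neg hc, Option.map_eq_some_iff] at h
      obtain ⟨k', hk', rfl⟩ := h
      obtain ⟨h1, h2, h3⟩ := ih k' hk'
      refine ⟨by simpa using h1, by simpa using h2, ?_⟩
      intro j hj
      cases j with
      | zero => simpa using fun h => hc h
      | succ j' => simpa using h3 j' (by omega)

theorem singleton_prefix_iff (a : Char) (l : List Char) : [a] <+: l ↔ l.head? = some a := by
  cases l with
  | nil => simp
  | cons x t => simp [List.cons_prefix_cons, eq_comm]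

-- the bridge: Python's find on a single space is findSp
theorem find_space_eq (l : List Char) :
    PySem.Chars.find l [' '] =
      (match findSp l with | some k => (k : Int) | none => -1) := by
  cases h : findSp l with
  | none =>
    simp only []
    rw [PySem.Chars.find_eq_neg_one_iff]
    rw [List.singleton_infix_iff]
    exact (findSp_eq_none_iff l).mp h
  | some k =>
    obtain ⟨hk, hget, hmin⟩ := findSp_eq_some l k h
    have hmem : ' ' ∈ l := by
      have := List.getElem?_eq_some_iff.mp hget
      exact this.elim fun h' hv => hv ▸ List.getElem_mem h'
    have hnn : 0 ≤ PySem.Chars.find l [' '] :=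
      (PySem.Chars.find_nonneg_iff l [' ']).mpr (List.singleton_infix_iff ' ' l |>.mpr hmem)
    obtain ⟨hpre, hlt⟩ := PySem.Chars.find_spec hnn
    -- translate prefixes of drops into getElem?
    have hdrop : ∀ i : Nat, ([' '] <+: l.drop i) ↔ l[i]? = some ' ' := by
      intro i
      rw [singleton_prefix_iff, List.head?_drop]
    have h1 : l[(PySem.Chars.find l [' ']).toNat]? = some ' ' := (hdrop _).mp hpre
    -- find ≤ k by minimality of findSp, k ≤ find by minimality of find
    have h2 : ¬ (PySem.Chars.find l [' ']).toNat < k := fun hlt' => hmin _ hlt' h1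
    have h3 : ¬ k < (PySem.Chars.find l [' ']).toNat := fun hlt' =>
      hlt k hlt' ((hdrop k).mpr hget)
    have : (PySem.Chars.find l [' ']).toNat = k := by omega
    simp only []
    omega

theorem findSp_drop_space_free (w : List Char) (d : Nat) (hw : ' ' ∉ w) :
    findSp (w.drop d) = none :=
  (findSp_eq_none_iff _).mpr fun h => hw (List.mem_of_mem_drop h)

-- A's loop over the words of a joined sentence finds exactly the first space at index ≥ d
theorem loopN_cons (l : Nat) (ls : List Nat) (d : Nat) :
    loopN (l :: ls) d = if d < l + 1 then l + 1 else (l + 1) + loopN ls (d - (l + 1)) := rfl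

theorem loopN_join (ws : List (List Char)) : ∀ (w : List Char), ' ' ∉ w → (∀ u ∈ ws, ' ' ∉ u) →
    ∀ d : Nat, d ≤ (PySem.Chars.join [' '] (w :: ws)).length →
    loopN ((w :: ws).map List.length) d =
      (match findSp ((PySem.Chars.join [' '] (w :: ws)).drop d) with
       | some k => d + k + 1
       | none => (PySem.Chars.join [' '] (w :: ws)).length + 1) := by
  induction ws with
  | nil =>
    intro w hw _ d hd
    rw [PySem.Chars.join_singleton] at hd ⊢
    rw [findSp_drop_space_free w d hw]
    show loopN ([w].map List.length) d = w.length + 1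
    rw [List.map_cons, List.map_nil, loopN_cons]
    simp only [loopN]
    split <;> omega
  | cons u ws' ih =>
    intro w hw hws d hd
    rw [PySem.Chars.join_cons_cons] at hd ⊢
    have hrest := ih u (hws u (by simp)) (fun v hv => hws v (by simp [hv]))
    by_cases hcase : d < w.length + 1
    · -- the cut is the space right after w
      have hdw : d ≤ w.length := by omega
      have hdrop : ((w ++ [' ']) ++ PySem.Chars.join [' '] (u :: ws')).drop d =
          w.drop d ++ ' ' :: PySem.Chars.join [' '] (u :: ws') := by
        rw [List.append_assoc, List.drop_append_of_le_length hdw]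
        simp
      rw [hdrop, findSp_append_not_mem _ _ (fun h => hw (List.mem_of_mem_drop h))]
      rw [List.map_cons, loopN_cons, if_pos hcase]
      show w.length + 1 = d + (w.drop d).length + 1
      simp only [List.length_drop]
      omega
    · -- the loop consumes w and the space, recurse into the rest
      have hlen : d - (w.length + 1) ≤ (PySem.Chars.join [' '] (u :: ws')).length := by
        simp at hd; omega
      have hdrop : ((w ++ [' ']) ++ PySem.Chars.join [' '] (u :: ws')).drop d =
          (PySem.Chars.join [' '] (u :: ws')).drop (d - (w.length + 1)) := by
        have hd' : d = (w ++ [' ']).length + (d - (w.length + 1)) := by simp; omega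
        conv_lhs => rw [hd']
        rw [List.drop_append]
        rw [List.drop_eq_nil_of_le (Nat.le_add_right _ _), List.nil_append]
        congr 1
        omega
      rw [hdrop]
      rw [List.map_cons, loopN_cons, if_neg (by omega : ¬ d < w.length + 1)]
      rw [hrest (d - (w.length + 1)) hlen]
      cases hfs : findSp ((PySem.Chars.join [' '] (u :: ws')).drop (d - (w.length + 1))) with
      | none =>
        show w.length + 1 + ((PySem.Chars.join [' '] (u :: ws')).length + 1) = _ + 1
        simp only [List.length_append, List.length_cons, List.length_nil]
        omega
      | some k =>
        show w.length + 1 + (d - (w.length + 1) + k + 1) = d + k + 1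
        omega

-- A's Int loop is loopN on the remaining threshold
theorem splithalfLoop_eq_loopN (ls : List Nat) : ∀ (c d : Nat), c ≤ d →
    splithalfLoop (ls.map (fun l : Nat => (l : Int))) (d : Int) (c : Int) =
      ((c + loopN ls (d - c) : Nat) : Int) := by
  induction ls with
  | nil => intro c d _; simp [splithalfLoop, loopN]
  | cons l ls' ih =>
    intro c d hcd
    rw [List.map_cons]
    simp only [splithalfLoop]
    rw [loopN_cons]
    by_cases hbr : d - c < l + 1
    · rw [if_pos (by omega)]
      rw [if_pos hbr]
      push_cast
      ring
    · rw [if_neg (by omega)]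
      have : ((c : Int) + l + 1) = (((c + l + 1 : Nat)) : Int) := by push_cast; ring
      rw [this, ih (c + l + 1) d (by omega)]
      rw [if_neg hbr]
      have harg : d - c - (l + 1) = d - (c + l + 1) := by omega
      rw [harg]
      push_cast; ring

-- the words A splits and their lengths
theorem words_eq (s : String) :
    ∃ words : List String, PySem.Str.split? s " " = some words ∧
      words.map String.toList = (splitCh s.toList).1 :: (splitCh s.toList).2 := by
  have h := PySem.Str.split?_map s " "
  rw [show (" " : String).toList = [' '] from rfl] at h
  unfold PySem.Chars.split? at h
  rw [if_neg (by simp)] at h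
  rw [splitOn_eq_splitCh] at h
  cases hs : PySem.Str.split? s " " with
  | none => rw [hs] at h; simp at h
  | some words =>
    rw [hs] at h
    simp only [Option.map_some, Option.some_inj] at h
    exact ⟨words, rfl, h⟩

-- ===== VERDICT (by name: the statement is the Claim_ definition above) =====
theorem splithalf_spec : Claim_equal_splithalf := by
  intro s _
  unfold Spec_splithalf splithalf splithalf_alt
  obtain ⟨words, hw, hwl⟩ := words_eq s
  set cs := s.toList with hcs
  set n := cs.length with hn
  -- midpos = n / 2 as a Nat cast
  have hlen : PySem.Str.len s = (n : Int) := rfl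
  have hmid : PySem.Int.floordiv (PySem.Str.len s) 2 = ((n / 2 : Nat) : Int) := by
    rw [hlen]; exact_mod_cast PySem.Int.floordiv_natCast n 2
  set m := n / 2 with hm
  have hmn : m ≤ n := Nat.div_le_self n 2
  -- word lengths as Nat casts
  have hlens : words.map PySem.Str.len =
      (((splitCh cs).1 :: (splitCh cs).2).map List.length).map (fun l : Nat => (l : Int)) := by
    rw [← hwl]
    simp [PySem.Str.len, Function.comp]
  -- the loop value
  have hfree := splitCh_space_free cs
  have hjoin := join_splitCh cs
  have hjlen : (PySem.Chars.join [' '] ((splitCh cs).1 :: (splitCh cs).2)).length = n := by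
    rw [hjoin]
  have hloop : splithalfLoop (words.map PySem.Str.len) ((m : Nat) : Int) 0 =
      ((loopN (((splitCh cs).1 :: (splitCh cs).2).map List.length) m : Nat) : Int) := by
    rw [hlens]
    have h0 : (0 : Int) = ((0 : Nat) : Int) := rfl
    rw [h0, splithalfLoop_eq_loopN _ 0 m (Nat.zero_le m)]
    simp
  rw [hw]
  simp only [Option.getD_some]
  rw [hmid, hloop]
  rw [loopN_join (splitCh cs).2 (splitCh cs).1 hfree.1 hfree.2 m (by rw [hjlen]; exact hmn)]
  -- B's side: findFrom at m
  have hffrom : PySem.Str.findFrom s " " ((m : Nat) : Int) =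
      PySem.Chars.findFrom cs [' '] ((m : Nat) : Int) := rfl
  have hfind := PySem.Chars.findFrom_natCast cs [' '] m (by rw [← hn]; exact hmn)
  rw [hffrom, hfind]
  rw [find_space_eq]
  rw [hjoin]
  cases hfs : findSp (cs.drop m) with
  | none =>
    -- no space at or after the middle: A's curpos is n+1, B returns (s, "")
    simp only [reduceIte]
    refine Prod.ext ?_ ?_
    · -- string[:n+1-1] = string
      show PySem.Str.slice s none (some (((n + 1 : Nat) : Int) - 1)) = s
      have h1 : (((n + 1 : Nat) : Int) - 1) = ((n : Nat) : Int) := by push_cast; ring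
      rw [h1]
      unfold PySem.Str.slice
      rw [PySem.Chars.slice_eq_listSlice, PySem.List.slice_to_natCast]
      have h2 : List.take n cs = cs := by rw [hn]; exact List.take_length
      rw [h2]
      exact String.ofList_toList
    · -- string[n+1:] = ""
      show PySem.Str.slice s (some ((n + 1 : Nat) : Int)) none = ""
      unfold PySem.Str.slice
      rw [PySem.Chars.slice_eq_listSlice, PySem.List.slice_from_natCast]
      rw [List.drop_eq_nil_of_le (show s.toList.length ≤ n + 1 by rw [← hcs]; omega)]
  | some k =>
    -- first space at index m+k: A's curpos is m+k+1, B cuts at idx = m+k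
    have h1 : ¬ ((k : Int)) = -1 := by omega
    have h2 : ¬ ((m : Nat) : Int) + (k : Int) = -1 := by omega
    simp only [if_neg h1, if_neg h2]
    refine Prod.ext ?_ ?_
    · show PySem.Str.slice s none (some (((m + k + 1 : Nat) : Int) - 1)) =
          PySem.Str.slice s none (some (((m : Nat) : Int) + (k : Int)))
      congr 1
      push_cast
      ring_nf
    · show PySem.Str.slice s (some ((m + k + 1 : Nat) : Int)) none =
          PySem.Str.slice s (some (((m : Nat) : Int) + (k : Int) + 1)) none
      congr 1
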